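-- pv_equiv track=rewrite | github.com/evancn7/purple_sunset | wordcloud_project.py | render_word_count
-- ===== SOURCE A (Python) =====
-- def render_word_count(text, common):
--     word = text.split()
--     word_frequency = {}
--     for word in word:
--         if word in common:
--             continue
--         elif len(word) < 5:
--             continue
--         else:
--             word_frequency[word] = word_frequency.get(word, 0) + 1
--     return word_frequency
-- ===== SOURCE B (Python) =====
-- def _group(words):
--     if not words:
--         return {}
--     w = words[0]
--     rest = [x for x in words if x != w]
--     result = {w: len(words) - len(rest)}
--     result.update(_group(rest))
--     return result
--
--
-- def render_word_count(text, common):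
--     words = [w for w in text.split() if w not in common and len(w) >= 5]
--     return _group(words)
-- ===== Notes on version B (the rewrite author's own statement) =====
-- stated objective: alternative
-- what changed: Replaces the single-pass hash-accumulate loop by a filter followed by a recursive extract-and-remove partition: take the first word, delete every occurrence of it from the list, record its count as the length difference, and recurse on the remainder.
import Mathlib
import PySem

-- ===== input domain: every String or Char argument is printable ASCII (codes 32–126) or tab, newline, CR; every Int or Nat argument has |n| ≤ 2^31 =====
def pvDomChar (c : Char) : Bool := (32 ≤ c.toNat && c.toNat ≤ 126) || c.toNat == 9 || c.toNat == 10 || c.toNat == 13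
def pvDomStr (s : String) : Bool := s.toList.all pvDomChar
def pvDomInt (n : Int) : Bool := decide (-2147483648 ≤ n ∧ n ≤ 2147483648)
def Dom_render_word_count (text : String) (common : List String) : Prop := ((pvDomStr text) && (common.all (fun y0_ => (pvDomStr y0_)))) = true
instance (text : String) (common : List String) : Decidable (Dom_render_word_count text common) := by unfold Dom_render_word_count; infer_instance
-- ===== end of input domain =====

-- B replaces A's hash-accumulate loop by filter + recursive extract-and-remove partition counting; proved to return the same dict (alternative, not faster).


-- ===== PORT A =====
-- for word in text.split(): skip common / short words, else word_frequency[word] = get(word,0)+1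
def render_word_count (text : String) (common : List String) : List (String × Int) :=
  let words := PySem.Str.split₀ text
  let word_frequency :=
    words.foldl (fun d w =>
      if common.contains w then d
      else if PySem.Str.len w < 5 then d
      else d.insert w (d.getD w 0 + 1)) (PySem.Dict.empty : PySem.Dict String Int)
  word_frequency.items

-- ===== PORT B =====
-- _group(words): take words[0], rest = [x for x in words if x != w],
-- result = {w: len(words) - len(rest)}; result.update(_group(rest))
def pvGroup (words : List String) : List (String × Int) :=
  match words with
  | [] => []
  | w :: t =>
    let rest := (w :: t).filter (fun x => x != w)
    (w, ((w :: t).length : Int) - rest.length) :: pvGroup rest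
  termination_by words.length
  decreasing_by
    simp only [List.filter_cons, bne_self_eq_false, Bool.false_eq_true, if_false,
      List.length_cons]
    exact Nat.lt_succ_of_le (List.length_filter_le _ _)

-- words = [w for w in text.split() if w not in common and len(w) >= 5]; return _group(words)
def render_word_count_alt (text : String) (common : List String) : List (String × Int) :=
  let words := (PySem.Str.split₀ text).filter
    (fun w => !common.contains w && 5 ≤ PySem.Str.len w)
  pvGroup words

-- ===== PRECONDITION & SPEC =====
def Spec_render_word_count (text : String) (common : List String) (out : List (String × Int)) : Prop := out = render_word_count_alt text common
instance (text : String) (common : List String) (out : List (String × Int)) : Decidable (Spec_render_word_count text common out) := by unfold Spec_render_word_count; infer_instance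

-- ===== CLAIM (what is proved, stated in full; the proofs are below) =====
def Claim_equal_render_word_count : Prop := ∀ (text : String) (common : List String), Dom_render_word_count text common → Spec_render_word_count text common (render_word_count text common)

-- ===== LEMMAS AND PROOFS =====

-- A's skip-branches are exactly a filter in front of the counting fold.
lemma foldl_skip_eq_foldl_filter (l : List String) (common : List String)
    (d : PySem.Dict String Int) :
    l.foldl (fun d w =>
      if common.contains w then d
      else if PySem.Str.len w < 5 then d
      else d.insert w (d.getD w 0 + 1)) d
    = (l.filter (fun w => !common.contains w && 5 ≤ PySem.Str.len w)).foldl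
        (fun d w => d.insert w (d.getD w 0 + 1)) d := by
  induction l generalizing d with
  | nil => rfl
  | cons x xs ih =>
    simp only [List.foldl_cons, List.filter_cons]
    simp at ih
    by_cases hc : x ∈ common
    · simp [hc, ih]
    · by_cases hl : 5 ≤ x.length
      · have hl' : ¬ x.length < 5 := by omega
        simp [hc, hl, hl', ih]
      · have hl' : x.length < 5 := by omega
        simp [hc, hl, hl', ih]

-- Elements beq-equal to a member of the accumulator never change the Set fold.
lemma foldl_add_filter_of_mem {α : Type} [BEq α] [LawfulBEq α]
    (t : List α) (w : α) (acc : List α) (h : w ∈ acc) :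
    List.foldl PySem.Set.add acc t
      = List.foldl PySem.Set.add acc (t.filter (fun x => x != w)) := by
  induction t generalizing acc with
  | nil => rfl
  | cons x xs ih =>
    by_cases hx : x = w
    · subst hx
      have : PySem.Set.add acc x = acc := by
        simp [PySem.Set.add, List.contains_eq_mem, h]
      simp [List.filter_cons, this, ih acc h]
    · simp only [List.filter_cons, bne_iff_ne, ne_eq, hx, not_false_eq_true,
        decide_true, if_true, List.foldl_cons]
      exact ih _ (by simp [PySem.Set.add]; split <;> simp [h])

-- A leading element absent from the rest of the fold's input stays in front.
lemma foldl_add_cons_of_not_mem {α : Type} [BEq α] [LawfulBEq α]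
    (l : List α) (w : α) (acc : List α) (h : w ∉ l) :
    List.foldl PySem.Set.add (w :: acc) l = w :: List.foldl PySem.Set.add acc l := by
  induction l generalizing acc with
  | nil => rfl
  | cons x xs ih =>
    simp only [List.mem_cons, not_or] at h
    have hx : (x == w) = false := by simp [beq_eq_false_iff_ne]; exact fun e => h.1 e.symm
    simp only [List.foldl_cons]
    have : PySem.Set.add (w :: acc) x
        = w :: PySem.Set.add acc x := by
      simp [PySem.Set.add, List.contains_eq_mem]
      have hxw : ¬ x = w := fun e => h.1 e.symm
      rcases Decidable.em (x ∈ acc) with hm | hm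
      · simp [hm, hxw]
      · simp [hm, hxw]
    rw [this, ih _ h.2]

-- First-occurrence dedup peels the head and drops its duplicates.
lemma ofList_cons_filter {α : Type} [BEq α] [LawfulBEq α] (w : α) (t : List α) :
    PySem.Set.ofList (w :: t)
      = w :: PySem.Set.ofList (t.filter (fun x => x != w)) := by
  unfold PySem.Set.ofList
  have h1 : List.foldl PySem.Set.add (PySem.Set.add PySem.Set.empty w) t
      = List.foldl PySem.Set.add [w] (t.filter (fun x => x != w)) := by
    have : PySem.Set.add PySem.Set.empty w = [w] := rfl
    rw [this]
    exact foldl_add_filter_of_mem t w [w] (by simp)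
  have h2 : w ∉ t.filter (fun x => x != w) := by
    intro hm
    simp only [List.mem_filter, bne_self_eq_false] at hm
    exact absurd hm.2 (by simp)
  simp only [List.foldl_cons, h1]
  exact foldl_add_cons_of_not_mem _ w PySem.Set.empty h2

-- length l - length (filter (· != w) l) = count w l (over Int)
lemma length_sub_filter_eq_count {α : Type} [BEq α] [LawfulBEq α] (l : List α) (w : α) :
    ((l.length : Int) - (l.filter (fun x => x != w)).length) = (l.count w : Int) := by
  induction l with
  | nil => simp
  | cons x xs ih =>
    by_cases hx : x = w
    · subst hx; simp [List.filter_cons, List.count_cons]; omega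
    · have hb : (x == w) = false := by simp [hx]
      simp [List.filter_cons, List.count_cons, hb, hx]
      omega

-- Counting k ≠ w is unaffected by deleting the w's.
lemma count_filter_ne {α : Type} [BEq α] [LawfulBEq α] (l : List α) (w k : α) (h : k ≠ w) :
    (l.filter (fun x => x != w)).count k = l.count k := by
  induction l with
  | nil => rfl
  | cons x xs ih =>
    by_cases hx : x = w
    · subst hx
      simp [List.filter_cons, List.count_cons, ih, Ne.symm h]
    · have hb : (x == w) = false := by simp [hx]
      have hkeep : (x != w) = true := by simp [bne, hb]
      simp only [List.filter_cons, hkeep, if_true]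
      rw [List.count_cons, List.count_cons, ih]

-- The recursive extract-and-remove pass produces Counter(l) in first-occurrence order.
lemma pvGroup_eq_counter_items (l : List String) :
    pvGroup l = (PySem.Set.ofList l).map (fun k => (k, (l.count k : Int))) := by
  induction hn : l.length using Nat.strong_induction_on generalizing l with
  | _ n ih =>
    match l with
    | [] => simp [pvGroup]
    | w :: t =>
      have hrest : (w :: t).filter (fun x => x != w) = t.filter (fun x => x != w) := by
        simp [List.filter_cons]
      have hlen : (t.filter (fun x => x != w)).length < n := by
        have := List.length_filter_le (fun x => x != w) t
        simp at hn; omega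
      rw [pvGroup, hrest]
      rw [ih _ hlen _ rfl]
      rw [ofList_cons_filter, List.map_cons]
      congr 1
      · rw [← hrest, length_sub_filter_eq_count]
      · apply List.map_congr_left
        intro k hk
        have hk' : k ∈ t.filter (fun x => x != w) :=
          (PySem.Set.mem_ofList _ _).mp hk
        have hkw : k ≠ w := by
          simp only [List.mem_filter, bne_iff_ne, ne_eq, decide_eq_true_eq] at hk'
          exact hk'.2
        rw [count_filter_ne t w k hkw, List.count_cons]
        simp [Ne.symm hkw]

theorem render_word_count_spec : Claim_equal_render_word_count := by
  intro text common _
  unfold Spec_render_word_count render_word_count render_word_count_alt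
  simp only [foldl_skip_eq_foldl_filter, PySem.Dict.foldl_insert_getD_add_one_eq_counter,
    PySem.Dict.items_counter, pvGroup_eq_counter_items]
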